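-- pv_equiv track=rewrite | github.com/murilo-marian/Algoritmo-Gen-tico---Pathfinding | main.py | procurar_movimentos_opostos
-- ===== SOURCE A (Python) =====
-- def procurar_movimentos_opostos(movimentos_com_menor_peso, pos_atual):
--     movimentos_opostos = []
--     for i, mov1 in enumerate(movimentos_com_menor_peso):
--         if movimentos_opostos:
--             break
--         for j, mov2 in enumerate(movimentos_com_menor_peso):
--             if i != j and movimentos_sao_opostos(mov1[1], mov2[1], pos_atual):
--                 movimentos_opostos = [mov1, mov2]
--                 break
--     return movimentos_opostos
--
-- def movimentos_sao_opostos(mov1, mov2, pos_atual):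
--     primeiro = [abs(a - b) for a, b in zip(mov1, pos_atual)]
--     segundo = [abs(a - b) for a, b in zip(mov2, pos_atual)]
--     if primeiro == segundo:
--         return True
--     return False
-- ===== SOURCE B (Python) =====
-- def procurar_movimentos_opostos(movimentos_com_menor_peso, pos_atual):
--     # One pass computes each move's abs-diff key, a counting dict finds which
--     # keys are duplicated, then a single scan takes the earliest move whose key
--     # occurs twice and its first later partner (A rescans the whole list per move).
--     keys = [tuple(abs(a - b) for a, b in zip(mov[1], pos_atual))
--             for mov in movimentos_com_menor_peso]
--     count = {}
--     for k in keys: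
--         count[k] = count.get(k, 0) + 1
--     pairs = list(zip(movimentos_com_menor_peso, keys))
--     for i, (mov1, k) in enumerate(pairs):
--         if count[k] >= 2:
--             for mov2, k2 in pairs[i + 1:]:
--                 if k2 == k:
--                     return [mov1, mov2]
--     return []
-- ===== Notes on version B (the rewrite author's own statement) =====
-- stated objective: faster
-- what changed: B precomputes each move's abs-diff key once and a counting dict of key multiplicities, then a single scan returns the earliest move whose key is duplicated together with its first later partner, instead of A's nested loop that recomputes keys and rescans the whole list for every move.
import Mathlib
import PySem

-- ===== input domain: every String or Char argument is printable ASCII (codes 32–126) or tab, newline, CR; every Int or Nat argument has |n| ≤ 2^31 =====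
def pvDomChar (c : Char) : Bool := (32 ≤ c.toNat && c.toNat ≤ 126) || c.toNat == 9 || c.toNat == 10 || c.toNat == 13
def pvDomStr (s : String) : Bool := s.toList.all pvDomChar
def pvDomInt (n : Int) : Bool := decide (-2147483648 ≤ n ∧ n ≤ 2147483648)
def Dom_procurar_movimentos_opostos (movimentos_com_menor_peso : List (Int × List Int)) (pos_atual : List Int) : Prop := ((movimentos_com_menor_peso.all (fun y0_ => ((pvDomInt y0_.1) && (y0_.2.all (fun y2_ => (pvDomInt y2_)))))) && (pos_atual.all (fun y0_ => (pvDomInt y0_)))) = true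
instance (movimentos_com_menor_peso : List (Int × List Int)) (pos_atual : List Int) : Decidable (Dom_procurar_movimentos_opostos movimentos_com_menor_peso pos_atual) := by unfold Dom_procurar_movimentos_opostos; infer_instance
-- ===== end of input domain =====

-- B replaces A's nested rescan with a per-move abs-diff key, a counting dict and one scan (faster: O(n*d) vs O(n^2*d)).


-- ===== PORT A =====
def movimentos_sao_opostos (mov1 mov2 pos_atual : List Int) : Bool :=
  let primeiro := (mov1.zip pos_atual).map (fun p => |p.1 - p.2|)
  let segundo := (mov2.zip pos_atual).map (fun p => |p.1 - p.2|)
  if primeiro == segundo then true else false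

-- inner 'for j, mov2 in enumerate(...)' loop, with its break
def pvInnerA (mov1 : Int × List Int) (i : Int) (pairs : List (Int × (Int × List Int))) (pos : List Int) : List (Int × List Int) :=
  match pairs with
  | [] => []
  | (j, mov2) :: t =>
    if (i != j) && movimentos_sao_opostos mov1.2 mov2.2 pos then [mov1, mov2]
    else pvInnerA mov1 i t pos

-- outer 'for i, mov1 in enumerate(...)' loop with the 'if movimentos_opostos: break'
def pvOuterA (pairs all : List (Int × (Int × List Int))) (pos : List Int) : List (Int × List Int) :=
  match pairs with
  | [] => []
  | (i, mov1) :: t =>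
    let r := pvInnerA mov1 i all pos
    if r.isEmpty then pvOuterA t all pos else r

def procurar_movimentos_opostos (movimentos_com_menor_peso : List (Int × List Int)) (pos_atual : List Int) : List (Int × List Int) :=
  pvOuterA (PySem.List.enumerate movimentos_com_menor_peso 0) (PySem.List.enumerate movimentos_com_menor_peso 0) pos_atual

-- ===== PORT B =====
-- abs-diff key of a move w.r.t. the current position (the tuple comprehension in Source B)
def pvKey (pos : List Int) (mov : Int × List Int) : List Int :=
  (mov.2.zip pos).map (fun p => |p.1 - p.2|)

-- inner 'for mov2, k2 in pairs[i+1:]' loop of Source B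
def pvFindB (k : List Int) (pairs : List ((Int × List Int) × List Int)) : Option (Int × List Int) :=
  match pairs with
  | [] => none
  | (mov2, k2) :: t => if k2 == k then some mov2 else pvFindB k t

-- outer 'for i, (mov1, k) in enumerate(pairs)' loop of Source B (head = i-th pair, tail = pairs[i+1:])
def pvScanB (pairs : List ((Int × List Int) × List Int)) (count : PySem.Dict (List Int) Int) : List (Int × List Int) :=
  match pairs with
  | [] => []
  | (mov1, k) :: t =>
    if count.getD k 0 ≥ 2 then
      match pvFindB k t with
      | some mov2 => [mov1, mov2]
      | none => pvScanB t count
    else pvScanB t count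

def procurar_movimentos_opostos_alt (movimentos_com_menor_peso : List (Int × List Int)) (pos_atual : List Int) : List (Int × List Int) :=
  let keys := movimentos_com_menor_peso.map (pvKey pos_atual)
  let count := keys.foldl (fun d k => d.insert k (d.getD k 0 + 1)) PySem.Dict.empty
  pvScanB (movimentos_com_menor_peso.zip keys) count

-- ===== PRECONDITION & SPEC =====
def Spec_procurar_movimentos_opostos (movimentos_com_menor_peso : List (Int × List Int)) (pos_atual : List Int) (out : List (Int × List Int)) : Prop := out = procurar_movimentos_opostos_alt movimentos_com_menor_peso pos_atual
instance (movimentos_com_menor_peso : List (Int × List Int)) (pos_atual : List Int) (out : List (Int × List Int)) : Decidable (Spec_procurar_movimentos_opostos movimentos_com_menor_peso pos_atual out) := by unfold Spec_procurar_movimentos_opostos; infer_instance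

-- ===== CLAIM (what is proved, stated in full; the proofs are below) =====
def Claim_equal_procurar_movimentos_opostos : Prop := ∀ (movimentos_com_menor_peso : List (Int × List Int)) (pos_atual : List Int), Dom_procurar_movimentos_opostos movimentos_com_menor_peso pos_atual → Spec_procurar_movimentos_opostos movimentos_com_menor_peso pos_atual (procurar_movimentos_opostos movimentos_com_menor_peso pos_atual)

-- ===== LEMMAS AND PROOFS =====

lemma sao_opostos_iff (mov1 mov2 : Int × List Int) (pos : List Int) :
    movimentos_sao_opostos mov1.2 mov2.2 pos = true ↔ pvKey pos mov1 = pvKey pos mov2 := by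
  simp [movimentos_sao_opostos, pvKey]

lemma pvInnerA_append_skip (mov1 : Int × List Int) (i : Int) (l rest : List (Int × (Int × List Int))) (pos : List Int)
    (h : ∀ jm ∈ l, ((i != jm.1) && movimentos_sao_opostos mov1.2 jm.2.2 pos) = false) :
    pvInnerA mov1 i (l ++ rest) pos = pvInnerA mov1 i rest pos := by
  induction l with
  | nil => rfl
  | cons hd tl ih =>
    obtain ⟨j, mov2⟩ := hd
    have hhd := h (j, mov2) (by simp)
    simp only [List.cons_append, pvInnerA, hhd, Bool.false_eq_true, if_false]
    exact ih (fun jm hm => h jm (by simp [hm]))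

lemma pvInnerA_tail (mov1 : Int × List Int) (i : Int) (suf : List (Int × List Int)) (pos : List Int) :
    ∀ s : Int, i < s →
    pvInnerA mov1 i (PySem.List.enumerate suf s) pos =
      (match pvFindB (pvKey pos mov1) (suf.zip (suf.map (pvKey pos))) with
       | some mov2 => [mov1, mov2]
       | none => []) := by
  induction suf with
  | nil => intro s _; simp [PySem.List.enumerate_nil, pvInnerA, pvFindB]
  | cons x t ih =>
    intro s hs
    rw [PySem.List.enumerate_cons]
    simp only [pvInnerA, List.map_cons, List.zip_cons_cons, pvFindB]
    have hne : (i != s) = true := by simp; omega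
    by_cases hk : pvKey pos x = pvKey pos mov1
    · have hop : movimentos_sao_opostos mov1.2 x.2 pos = true := (sao_opostos_iff mov1 x pos).2 hk.symm
      rw [if_pos (by simp [hne, hop]), if_pos (by simp [hk])]
    · have hop : movimentos_sao_opostos mov1.2 x.2 pos = false := by
        rcases h : movimentos_sao_opostos mov1.2 x.2 pos with _ | _
        · rfl
        · exact absurd ((sao_opostos_iff mov1 x pos).1 h).symm hk
      rw [if_neg (by simp [hop]), if_neg (by simp [hk])]
      exact ih (s + 1) (by omega)

lemma pvFindB_none_iff (k : List Int) (l : List (Int × List Int)) (pos : List Int) :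
    pvFindB k (l.zip (l.map (pvKey pos))) = none ↔ ∀ x ∈ l, pvKey pos x ≠ k := by
  induction l with
  | nil => simp [pvFindB]
  | cons x t ih =>
    simp only [List.map_cons, List.zip_cons_cons, pvFindB]
    by_cases hk : pvKey pos x = k
    · simp [hk]
    · simp [hk, ih]

lemma pvMain (pos : List Int) (m : List (Int × List Int)) (cnt : PySem.Dict (List Int) Int)
    (hc : ∀ k, cnt.getD k 0 = ((m.map (pvKey pos)).count k : Int)) :
    ∀ (suf pre : List (Int × List Int)), m = pre ++ suf →
    (∀ x ∈ pre, (m.map (pvKey pos)).count (pvKey pos x) = 1) →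
    pvOuterA (PySem.List.enumerate suf (pre.length : Int)) (PySem.List.enumerate m 0) pos
      = pvScanB (suf.zip (suf.map (pvKey pos))) cnt := by
  intro suf
  induction suf with
  | nil => intro pre hm hinv; simp [PySem.List.enumerate_nil, pvOuterA, pvScanB]
  | cons mov1 suf' ih =>
    intro pre hm hinv
    -- key counts split along m = pre ++ mov1 :: suf'
    have hsplit : ∀ k, (m.map (pvKey pos)).count k
        = (pre.map (pvKey pos)).count k + (if pvKey pos mov1 = k then 1 else 0) + (suf'.map (pvKey pos)).count k := by
      intro k
      subst hm
      simp [List.count_append, List.count_cons]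
      by_cases h : pvKey pos mov1 = k <;> simp [h] <;> omega
    -- no element of pre shares mov1's key
    have hpre0 : (pre.map (pvKey pos)).count (pvKey pos mov1) = 0 := by
      rw [List.count_eq_zero]
      intro hmem
      obtain ⟨x, hx, hkx⟩ := List.mem_map.1 hmem
      have hone := hinv x hx
      rw [hkx] at hone
      have hs := hsplit (pvKey pos mov1)
      rw [if_pos rfl] at hs
      have hposcnt : 0 < (pre.map (pvKey pos)).count (pvKey pos mov1) :=
        List.count_pos_iff.2 (hkx ▸ List.mem_map_of_mem hx)
      omega
    -- A side: unfold one outer step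
    rw [PySem.List.enumerate_cons]
    simp only [pvOuterA]
    have hi : (pre.length : Int) < (pre.length : Int) + 1 := by omega
    have henum : PySem.List.enumerate m 0
        = PySem.List.enumerate pre 0 ++ ((pre.length : Int), mov1) :: PySem.List.enumerate suf' ((pre.length : Int) + 1) := by
      rw [hm, PySem.List.enumerate_append, PySem.List.enumerate_cons]
      norm_num
    have hskip : pvInnerA mov1 (pre.length : Int) (PySem.List.enumerate m 0) pos
        = pvInnerA mov1 (pre.length : Int) (PySem.List.enumerate suf' ((pre.length : Int) + 1)) pos := by
      rw [henum]
      rw [pvInnerA_append_skip]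
      · simp only [pvInnerA]
        rw [if_neg (by simp)]
      · intro jm hjm
        obtain ⟨kk, hkk, heq⟩ := (PySem.List.mem_enumerate_iff _ _ _).1 hjm
        have hxmem : jm.2 ∈ pre := by rw [heq]; exact List.getElem_mem _
        have hkne : pvKey pos jm.2 ≠ pvKey pos mov1 := by
          intro hkeq
          have hmm : pvKey pos mov1 ∈ pre.map (pvKey pos) := hkeq ▸ List.mem_map_of_mem hxmem
          exact absurd (List.count_pos_iff.2 hmm) (by omega)
        have hop : movimentos_sao_opostos mov1.2 jm.2.2 pos = false := by
          rcases h : movimentos_sao_opostos mov1.2 jm.2.2 pos with _ | _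
          · rfl
          · exact absurd ((sao_opostos_iff mov1 jm.2 pos).1 h).symm hkne
        simp [hop]
    rw [hskip, pvInnerA_tail mov1 (pre.length : Int) suf' pos ((pre.length : Int) + 1) hi]
    -- B side: unfold one scan step
    simp only [List.map_cons, List.zip_cons_cons, pvScanB, hc (pvKey pos mov1)]
    rcases hfind : pvFindB (pvKey pos mov1) (suf'.zip (suf'.map (pvKey pos))) with _ | mov2
    · -- no partner after mov1: its key occurs exactly once in m, both sides move on
      have hsuf0 : (suf'.map (pvKey pos)).count (pvKey pos mov1) = 0 := by
        rw [List.count_eq_zero]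
        intro hmem
        obtain ⟨x, hx, hkx⟩ := List.mem_map.1 hmem
        exact (pvFindB_none_iff _ _ _).1 hfind x hx hkx
      have h1 : (m.map (pvKey pos)).count (pvKey pos mov1) = 1 := by
        have hs := hsplit (pvKey pos mov1)
        rw [if_pos rfl] at hs
        omega
      rw [h1]
      norm_num
      have hrec := ih (pre ++ [mov1]) (by simp [hm]) (by
        intro x hx
        rcases List.mem_append.1 hx with hx' | hx'
        · exact hinv x hx'
        · simp at hx'
          subst hx'
          exact h1)
      have hst : (((pre ++ [mov1]).length : Nat) : Int) = (pre.length : Int) + 1 := by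
        simp
      rw [hst] at hrec
      exact hrec
    · -- partner found: key duplicated, both sides return [mov1, mov2]
      have hex : pvKey pos mov1 ∈ suf'.map (pvKey pos) := by
        by_contra hnm
        have hn : pvFindB (pvKey pos mov1) (suf'.zip (suf'.map (pvKey pos))) = none :=
          (pvFindB_none_iff _ _ _).2 (fun x hx hkx => hnm (hkx ▸ List.mem_map_of_mem hx))
        rw [hn] at hfind
        cases hfind
      have hcnt : 1 ≤ (suf'.map (pvKey pos)).count (pvKey pos mov1) := List.count_pos_iff.2 hex
      have hs := hsplit (pvKey pos mov1)
      rw [if_pos rfl] at hs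
      rw [if_neg (by simp)]
      rw [if_pos (by omega)]

-- ===== VERDICT (by name: the statement is the Claim_ definition above) =====
theorem procurar_movimentos_opostos_spec : Claim_equal_procurar_movimentos_opostos := by
  intro m pos _
  unfold Spec_procurar_movimentos_opostos
  simp only [procurar_movimentos_opostos, procurar_movimentos_opostos_alt]
  rw [PySem.Dict.foldl_insert_getD_add_one_eq_counter]
  exact pvMain pos m _ (fun k => PySem.Dict.getD_counter _ _) m [] rfl (by simp)
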